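-- pv_equiv track=rewrite | github.com/hell-webcoder/cloner | website_cloner/analyzer/styles.py | extract_computed_styles
-- ===== SOURCE A (Python) =====
-- from typing import Dict, List, Set, Optional, Any
--
-- def extract_computed_styles(
--
--     element_styles: Dict[str, Dict[str, str]]
-- ) -> Dict[str, Dict[str, str]]:
--     """
--     Process computed styles from browser.
--
--     Args:
--         element_styles: Dictionary of element selectors to computed styles
--
--     Returns:
--         Processed styles grouped by category
--     """
--     categorized = {
--         'layout': {},
--         'typography': {},
--         'colors': {},
--         'spacing': {},
--         'borders': {},
--         'effects': {},
--     }
--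
--     layout_props = {'display', 'position', 'flex', 'grid', 'float', 'clear'}
--     typography_props = {'font', 'text', 'line-height', 'letter-spacing', 'word'}
--     color_props = {'color', 'background', 'border-color', 'outline-color'}
--     spacing_props = {'margin', 'padding', 'gap'}
--     border_props = {'border', 'border-radius', 'outline'}
--     effect_props = {'box-shadow', 'text-shadow', 'opacity', 'transform', 'transition'}
--
--     for selector, styles in element_styles.items():
--         for prop, value in styles.items():
--             prop_lower = prop.lower()
--
--             if any(p in prop_lower for p in layout_props):
--                 categorized['layout'][f"{selector}:{prop}"] = value
--             elif any(p in prop_lower for p in typography_props):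
--                 categorized['typography'][f"{selector}:{prop}"] = value
--             elif any(p in prop_lower for p in color_props):
--                 categorized['colors'][f"{selector}:{prop}"] = value
--             elif any(p in prop_lower for p in spacing_props):
--                 categorized['spacing'][f"{selector}:{prop}"] = value
--             elif any(p in prop_lower for p in border_props):
--                 categorized['borders'][f"{selector}:{prop}"] = value
--             elif any(p in prop_lower for p in effect_props):
--                 categorized['effects'][f"{selector}:{prop}"] = value
--
--     return categorized
-- ===== SOURCE B (Python) =====
-- CATEGORIES = [
--     ('layout', ['display', 'position', 'flex', 'grid', 'float', 'clear']),
--     ('typography', ['font', 'text', 'line-height', 'letter-spacing', 'word']),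
--     ('colors', ['color', 'background', 'border-color', 'outline-color']),
--     ('spacing', ['margin', 'padding', 'gap']),
--     ('borders', ['border', 'border-radius', 'outline']),
--     ('effects', ['box-shadow', 'text-shadow', 'opacity', 'transform', 'transition']),
-- ]
--
--
-- def _category_of(prop_lower):
--     for name, keywords in CATEGORIES:
--         if any(kw in prop_lower for kw in keywords):
--             return name
--     return None
--
--
-- def extract_computed_styles(element_styles):
--     items = [
--         (f"{selector}:{prop}", _category_of(prop.lower()), value)
--         for selector, styles in element_styles.items()
--         for prop, value in styles.items()
--     ]
--     return {
--         name: {key: value for key, cat, value in items if cat == name}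
--         for name, _ in CATEGORIES
--     }
-- ===== Notes on version B (the rewrite author's own statement) =====
-- stated objective: idiomatic
-- what changed: A's nested loop with a six-way if/elif chain of set-membership tests and in-place nested-dict mutation is replaced by a data-driven decomposition: the input is flattened once into (key, prop_lower, value) items, a first-match lookup over an ordered CATEGORIES table replaces the if/elif chain, and the result is built by per-category dict comprehensions over the flattened items.
import Mathlib
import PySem

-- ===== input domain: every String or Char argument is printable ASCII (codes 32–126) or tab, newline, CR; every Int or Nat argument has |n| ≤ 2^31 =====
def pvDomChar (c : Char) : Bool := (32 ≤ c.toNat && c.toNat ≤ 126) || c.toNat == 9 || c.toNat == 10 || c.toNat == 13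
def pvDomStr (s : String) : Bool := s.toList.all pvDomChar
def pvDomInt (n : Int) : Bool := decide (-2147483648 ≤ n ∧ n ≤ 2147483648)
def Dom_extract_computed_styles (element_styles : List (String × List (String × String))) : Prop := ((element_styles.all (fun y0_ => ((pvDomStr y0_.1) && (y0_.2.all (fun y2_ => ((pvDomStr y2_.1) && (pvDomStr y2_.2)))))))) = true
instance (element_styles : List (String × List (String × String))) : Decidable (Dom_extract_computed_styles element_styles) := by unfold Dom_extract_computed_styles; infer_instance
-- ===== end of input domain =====

-- ===== PORT A =====
-- B is an idiomatic table-driven re-decomposition of A (flatten once, a first-match category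
-- lookup, per-category dict comprehensions) with the same cost; return values proved equal.
def pvLayoutProps : List String := PySem.Set.ofList ["display", "position", "flex", "grid", "float", "clear"]
def pvTypographyProps : List String := PySem.Set.ofList ["font", "text", "line-height", "letter-spacing", "word"]
def pvColorProps : List String := PySem.Set.ofList ["color", "background", "border-color", "outline-color"]
def pvSpacingProps : List String := PySem.Set.ofList ["margin", "padding", "gap"]
def pvBorderProps : List String := PySem.Set.ofList ["border", "border-radius", "outline"]
def pvEffectProps : List String := PySem.Set.ofList ["box-shadow", "text-shadow", "opacity", "transform", "transition"]

-- any(p in prop_lower for p in props)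
def pvAnyIn (props : List String) (propLower : String) : Bool :=
  props.any (fun p => PySem.Str.isIn p propLower)

def extract_computed_styles (element_styles : List (String × List (String × String))) : List (String × List (String × String)) :=
  let categorized : PySem.Dict String (PySem.Dict String String) :=
    PySem.Dict.ofList
      [("layout", PySem.Dict.empty), ("typography", PySem.Dict.empty), ("colors", PySem.Dict.empty),
       ("spacing", PySem.Dict.empty), ("borders", PySem.Dict.empty), ("effects", PySem.Dict.empty)]
  let final := element_styles.foldl (fun categorized sv =>
    sv.2.foldl (fun categorized pv =>
      let prop_lower := PySem.Str.lower pv.1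
      let key := sv.1 ++ ":" ++ pv.1
      if pvAnyIn pvLayoutProps prop_lower then
        categorized.modify "layout" PySem.Dict.empty (fun m => m.insert key pv.2)
      else if pvAnyIn pvTypographyProps prop_lower then
        categorized.modify "typography" PySem.Dict.empty (fun m => m.insert key pv.2)
      else if pvAnyIn pvColorProps prop_lower then
        categorized.modify "colors" PySem.Dict.empty (fun m => m.insert key pv.2)
      else if pvAnyIn pvSpacingProps prop_lower then
        categorized.modify "spacing" PySem.Dict.empty (fun m => m.insert key pv.2)
      else if pvAnyIn pvBorderProps prop_lower then
        categorized.modify "borders" PySem.Dict.empty (fun m => m.insert key pv.2)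
      else if pvAnyIn pvEffectProps prop_lower then
        categorized.modify "effects" PySem.Dict.empty (fun m => m.insert key pv.2)
      else categorized) categorized) categorized
  final.items.map (fun p => (p.1, p.2.items))

-- ===== PORT B =====
def pvCATEGORIES : List (String × List String) :=
  [("layout", ["display", "position", "flex", "grid", "float", "clear"]),
   ("typography", ["font", "text", "line-height", "letter-spacing", "word"]),
   ("colors", ["color", "background", "border-color", "outline-color"]),
   ("spacing", ["margin", "padding", "gap"]),
   ("borders", ["border", "border-radius", "outline"]),
   ("effects", ["box-shadow", "text-shadow", "opacity", "transform", "transition"])]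

-- first category whose keyword occurs in prop_lower, else none
def pvCategoryOf (propLower : String) : Option String :=
  (pvCATEGORIES.find? (fun c => c.2.any (fun kw => PySem.Str.isIn kw propLower))).map (fun c => c.1)

def extract_computed_styles_alt (element_styles : List (String × List (String × String))) : List (String × List (String × String)) :=
  let items := element_styles.flatMap (fun sv =>
    sv.2.map (fun pv => (sv.1 ++ ":" ++ pv.1, pvCategoryOf (PySem.Str.lower pv.1), pv.2)))
  pvCATEGORIES.map (fun c =>
    (c.1, (items.foldl (fun d it =>
            if it.2.1 == some c.1 then d.insert it.1 it.2.2 else d)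
          (PySem.Dict.empty : PySem.Dict String String)).items))

-- ===== PRECONDITION & SPEC =====
-- Pre_ requires unique outer selectors and unique property names per selector: the Python
-- argument is a dict of dicts, whose keys are unique by construction; an association list
-- with duplicate keys does not represent any Python input of A.
def Pre_extract_computed_styles (element_styles : List (String × List (String × String))) : Prop :=
  (element_styles.map Prod.fst).Nodup ∧ ∀ sv ∈ element_styles, (sv.2.map Prod.fst).Nodup
instance (element_styles : List (String × List (String × String))) : Decidable (Pre_extract_computed_styles element_styles) := by unfold Pre_extract_computed_styles; infer_instance

def pvWitness_extract_computed_styles : (List (String × List (String × String))) :=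
  [("body", [("display", "flex"), ("font-size", "12px"), ("color", "red"), ("z-index", "3")]),
   (".nav", [("margin-top", "0"), ("border", "1px"), ("opacity", "0.5")])]

def Spec_extract_computed_styles (element_styles : List (String × List (String × String))) (out : List (String × List (String × String))) : Prop := out = extract_computed_styles_alt element_styles
instance (element_styles : List (String × List (String × String))) (out : List (String × List (String × String))) : Decidable (Spec_extract_computed_styles element_styles out) := by unfold Spec_extract_computed_styles; infer_instance

-- ===== CLAIM (what is proved, stated in full; the proofs are below) =====
def Claim_equal_extract_computed_styles : Prop := ∀ (element_styles : List (String × List (String × String))), Dom_extract_computed_styles element_styles → Pre_extract_computed_styles element_styles → Spec_extract_computed_styles element_styles (extract_computed_styles element_styles)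

-- ===== LEMMAS AND PROOFS =====

-- an item of B's flattened list: (key, prop_lower, value)
def pvToItem (sel : String) (pv : String × String) : String × String × String :=
  (sel ++ ":" ++ pv.1, PySem.Str.lower pv.1, pv.2)

-- A's per-item step, on the flattened item
def pvStepA (cat : PySem.Dict String (PySem.Dict String String)) (it : String × String × String) :
    PySem.Dict String (PySem.Dict String String) :=
  if pvAnyIn pvLayoutProps it.2.1 then cat.modify "layout" PySem.Dict.empty (fun m => m.insert it.1 it.2.2)
  else if pvAnyIn pvTypographyProps it.2.1 then cat.modify "typography" PySem.Dict.empty (fun m => m.insert it.1 it.2.2)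
  else if pvAnyIn pvColorProps it.2.1 then cat.modify "colors" PySem.Dict.empty (fun m => m.insert it.1 it.2.2)
  else if pvAnyIn pvSpacingProps it.2.1 then cat.modify "spacing" PySem.Dict.empty (fun m => m.insert it.1 it.2.2)
  else if pvAnyIn pvBorderProps it.2.1 then cat.modify "borders" PySem.Dict.empty (fun m => m.insert it.1 it.2.2)
  else if pvAnyIn pvEffectProps it.2.1 then cat.modify "effects" PySem.Dict.empty (fun m => m.insert it.1 it.2.2)
  else cat

def pvIns (d : PySem.Dict String String) (its : List (String × String × String)) : PySem.Dict String String :=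
  its.foldl (fun d it => d.insert it.1 it.2.2) d

def pvIsCat (name : String) (it : String × String × String) : Bool :=
  pvCategoryOf it.2.1 == some name

-- the six Python set literals, as the keyword lists they were built from
lemma pvLayoutProps_eq : pvLayoutProps = ["display", "position", "flex", "grid", "float", "clear"] := by decide
lemma pvTypographyProps_eq : pvTypographyProps = ["font", "text", "line-height", "letter-spacing", "word"] := by decide
lemma pvColorProps_eq : pvColorProps = ["color", "background", "border-color", "outline-color"] := by decide
lemma pvSpacingProps_eq : pvSpacingProps = ["margin", "padding", "gap"] := by decide
lemma pvBorderProps_eq : pvBorderProps = ["border", "border-radius", "outline"] := by decide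
lemma pvEffectProps_eq : pvEffectProps = ["box-shadow", "text-shadow", "opacity", "transform", "transition"] := by decide

-- pvCategoryOf as the if-chain of A's six tests
lemma pvCategoryOf_eq (pl : String) :
    pvCategoryOf pl =
      if pvAnyIn pvLayoutProps pl = true then some "layout"
      else if pvAnyIn pvTypographyProps pl = true then some "typography"
      else if pvAnyIn pvColorProps pl = true then some "colors"
      else if pvAnyIn pvSpacingProps pl = true then some "spacing"
      else if pvAnyIn pvBorderProps pl = true then some "borders"
      else if pvAnyIn pvEffectProps pl = true then some "effects"
      else none := by
  unfold pvCategoryOf pvCATEGORIES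
  simp only [← pvLayoutProps_eq, ← pvTypographyProps_eq, ← pvColorProps_eq, ← pvSpacingProps_eq, ← pvBorderProps_eq, ← pvEffectProps_eq]
  by_cases h1 : (pvLayoutProps.any fun kw => PySem.Chars.isIn kw.toList pl.toList) = true <;>
  by_cases h2 : (pvTypographyProps.any fun kw => PySem.Chars.isIn kw.toList pl.toList) = true <;>
  by_cases h3 : (pvColorProps.any fun kw => PySem.Chars.isIn kw.toList pl.toList) = true <;>
  by_cases h4 : (pvSpacingProps.any fun kw => PySem.Chars.isIn kw.toList pl.toList) = true <;>
  by_cases h5 : (pvBorderProps.any fun kw => PySem.Chars.isIn kw.toList pl.toList) = true <;>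
  by_cases h6 : (pvEffectProps.any fun kw => PySem.Chars.isIn kw.toList pl.toList) = true <;>
  simp [pvAnyIn, h1, h2, h3, h4, h5, h6]

lemma pvIns_cons (d : PySem.Dict String String) (it : String × String × String) (l : List (String × String × String)) :
    pvIns d (it :: l) = pvIns (d.insert it.1 it.2.2) l := rfl

-- the core invariant: folding A's step from a six-slot state fills each slot with the
-- insertions of exactly the items of its own category, in order
lemma pvFold_six (its : List (String × String × String)) (a b c d e f : PySem.Dict String String) :
    its.foldl pvStepA
      (PySem.Dict.mk [("layout", a), ("typography", b), ("colors", c), ("spacing", d), ("borders", e), ("effects", f)]) =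
    PySem.Dict.mk
      [("layout", pvIns a (its.filter (pvIsCat "layout"))),
       ("typography", pvIns b (its.filter (pvIsCat "typography"))),
       ("colors", pvIns c (its.filter (pvIsCat "colors"))),
       ("spacing", pvIns d (its.filter (pvIsCat "spacing"))),
       ("borders", pvIns e (its.filter (pvIsCat "borders"))),
       ("effects", pvIns f (its.filter (pvIsCat "effects")))] := by
  induction its generalizing a b c d e f with
  | nil => simp [pvIns]
  | cons it rest ih =>
    simp only [List.foldl_cons, List.filter_cons]
    by_cases h1 : (pvLayoutProps.any fun kw => PySem.Chars.isIn kw.toList it.2.1.toList) = true <;>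
    by_cases h2 : (pvTypographyProps.any fun kw => PySem.Chars.isIn kw.toList it.2.1.toList) = true <;>
    by_cases h3 : (pvColorProps.any fun kw => PySem.Chars.isIn kw.toList it.2.1.toList) = true <;>
    by_cases h4 : (pvSpacingProps.any fun kw => PySem.Chars.isIn kw.toList it.2.1.toList) = true <;>
    by_cases h5 : (pvBorderProps.any fun kw => PySem.Chars.isIn kw.toList it.2.1.toList) = true <;>
    by_cases h6 : (pvEffectProps.any fun kw => PySem.Chars.isIn kw.toList it.2.1.toList) = true <;>
    simp [pvStepA, pvAnyIn, pvIsCat, pvCategoryOf_eq, pvIns_cons, h1, h2, h3, h4, h5, h6,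
      PySem.Dict.modify, PySem.Dict.insert, PySem.Dict.contains, PySem.Dict.get?, PySem.Dict.getD, List.find?_cons, ih]
      <;> rfl

-- ===== VERDICT (by name: the statement is the Claim_ definition above) =====
theorem extract_computed_styles_spec : Claim_equal_extract_computed_styles := by
  intro es _ _
  show extract_computed_styles es = extract_computed_styles_alt es
  unfold extract_computed_styles extract_computed_styles_alt
  have hA : (fun (cat : PySem.Dict String (PySem.Dict String String)) (sv : String × List (String × String)) =>
      sv.2.foldl (fun categorized pv =>
        let prop_lower := PySem.Str.lower pv.1
        let key := sv.1 ++ ":" ++ pv.1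
        if pvAnyIn pvLayoutProps prop_lower then
          categorized.modify "layout" PySem.Dict.empty (fun m => m.insert key pv.2)
        else if pvAnyIn pvTypographyProps prop_lower then
          categorized.modify "typography" PySem.Dict.empty (fun m => m.insert key pv.2)
        else if pvAnyIn pvColorProps prop_lower then
          categorized.modify "colors" PySem.Dict.empty (fun m => m.insert key pv.2)
        else if pvAnyIn pvSpacingProps prop_lower then
          categorized.modify "spacing" PySem.Dict.empty (fun m => m.insert key pv.2)
        else if pvAnyIn pvBorderProps prop_lower then
          categorized.modify "borders" PySem.Dict.empty (fun m => m.insert key pv.2)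
        else if pvAnyIn pvEffectProps prop_lower then
          categorized.modify "effects" PySem.Dict.empty (fun m => m.insert key pv.2)
        else categorized) cat) =
      (fun cat sv => (sv.2.map (pvToItem sv.1)).foldl pvStepA cat) := by
    funext cat sv
    rw [List.foldl_map]
    rfl
  simp only [hA, ← List.foldl_flatMap]
  rw [show (PySem.Dict.ofList
      [("layout", (PySem.Dict.empty : PySem.Dict String String)), ("typography", PySem.Dict.empty), ("colors", PySem.Dict.empty),
       ("spacing", PySem.Dict.empty), ("borders", PySem.Dict.empty), ("effects", PySem.Dict.empty)]) =
    PySem.Dict.mk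
      [("layout", PySem.Dict.empty), ("typography", PySem.Dict.empty), ("colors", PySem.Dict.empty),
       ("spacing", PySem.Dict.empty), ("borders", PySem.Dict.empty), ("effects", PySem.Dict.empty)] from by decide]
  rw [pvFold_six]
  have hB : ∀ (sv : String × List (String × String)),
      sv.2.map (fun pv => (sv.1 ++ ":" ++ pv.1, pvCategoryOf (PySem.Str.lower pv.1), pv.2)) =
      (sv.2.map (pvToItem sv.1)).map (fun it => (it.1, pvCategoryOf it.2.1, it.2.2)) := by
    intro sv; rw [List.map_map]; rfl
  simp only [hB, ← List.map_flatMap, List.foldl_map]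
  simp only [pvCATEGORIES, List.map_cons, List.map_nil, pvIns, List.foldl_filter]
  rfl
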